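-- pv_equiv track=rewrite | github.com/DevilDublin/Dev-Projects | password-strength-auditor/password_auditor.py | _base_upgrade
-- ===== SOURCE A (Python) =====
-- def _base_upgrade(pw: str) -> str:
--     """Apply a minimal upgrade to meet decent standards."""
--     suggestion = pw
--
--     if len(suggestion) < 12:
--         suggestion = suggestion + "!" * (12 - len(suggestion))
--
--     if not any(c.isupper() for c in suggestion):
--         suggestion += "A"
--     if not any(c.isdigit() for c in suggestion):
--         suggestion += "3"
--     if not any(not c.isalnum() for c in suggestion):
--         suggestion += "!"
--
--     return suggestion
-- ===== SOURCE B (Python) =====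
-- def _category(c: str) -> str:
--     """Map a character to its strength category: U(pper), D(igit), S(pecial), or '-'."""
--     if c.isupper():
--         return "U"
--     if c.isdigit():
--         return "D"
--     if not c.isalnum():
--         return "S"
--     return "-"
--
--
-- def _base_upgrade(pw: str) -> str:
--     """Apply a minimal upgrade to meet decent standards."""
--     padded = pw if len(pw) >= 12 else pw + "!" * (12 - len(pw))
--     cats = {_category(c) for c in padded}
--     fixes = (("U", "A"), ("D", "3"), ("S", "!"))
--     return padded + "".join(f for k, f in fixes if k not in cats)
-- ===== Notes on version B (the rewrite author's own statement) =====
-- stated objective: alternative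
-- what changed: Instead of A's three any() scans over progressively extended strings followed by an if-chain of appends, B classifies each character once into a category symbol, builds the set of categories present in the padded string, and appends the suffix table-driven by filtering a (category, fix-char) table against that set.
import Mathlib
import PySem

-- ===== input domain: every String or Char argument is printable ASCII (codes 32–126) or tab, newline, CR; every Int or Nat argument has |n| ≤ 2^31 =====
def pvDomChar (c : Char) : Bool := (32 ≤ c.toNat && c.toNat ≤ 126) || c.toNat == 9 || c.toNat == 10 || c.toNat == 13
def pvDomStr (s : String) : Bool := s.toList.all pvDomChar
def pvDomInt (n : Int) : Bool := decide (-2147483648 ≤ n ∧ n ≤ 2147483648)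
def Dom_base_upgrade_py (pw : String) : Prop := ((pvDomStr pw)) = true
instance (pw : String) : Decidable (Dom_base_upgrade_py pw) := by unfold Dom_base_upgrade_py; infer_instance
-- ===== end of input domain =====

-- B replaces A's three any() scans and if-chain of appends by a per-character category
-- classification, a set of present categories, and a table-driven suffix (objective: alternative).

-- ===== PORT A =====
def base_upgrade_py (pw : String) : String :=
  let s0 := pw.toList
  let s1 := if s0.length < 12 then s0 ++ List.replicate (12 - s0.length) '!' else s0
  let s2 := if s1.any (fun c => PySem.Chars.isupper c) then s1 else s1 ++ ['A']
  let s3 := if s2.any (fun c => PySem.Chars.isdigit c) then s2 else s2 ++ ['3']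
  let s4 := if s3.any (fun c => !PySem.Chars.isalnum c) then s3 else s3 ++ ['!']
  String.ofList s4

-- ===== PORT B =====
-- Source B's _category helper: the strength category of one character
def pvCategory (c : Char) : Char :=
  if PySem.Chars.isupper c then 'U'
  else if PySem.Chars.isdigit c then 'D'
  else if !PySem.Chars.isalnum c then 'S'
  else '-'

def base_upgrade_py_alt (pw : String) : String :=
  let padded := if 12 ≤ pw.toList.length then pw.toList
                else pw.toList ++ List.replicate (12 - pw.toList.length) '!'
  -- the set comprehension {_category(c) for c in padded}; only membership is read off it
  let cats : PySem.Set Char := PySem.Set.ofList (padded.map pvCategory)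
  let fixes : List (Char × Char) := [('U', 'A'), ('D', '3'), ('S', '!')]
  String.ofList (padded ++ (fixes.filter (fun kf => !(PySem.Set.contains cats kf.1))).map (·.2))

-- ===== PRECONDITION & SPEC =====
def Spec_base_upgrade_py (pw : String) (out : String) : Prop := out = base_upgrade_py_alt pw
instance (pw : String) (out : String) : Decidable (Spec_base_upgrade_py pw out) := by unfold Spec_base_upgrade_py; infer_instance

-- ===== CLAIM (what is proved, stated in full; the proofs are below) =====
def Claim_equal_base_upgrade_py : Prop := ∀ (pw : String), Dom_base_upgrade_py pw → Spec_base_upgrade_py pw (base_upgrade_py pw)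

-- ===== LEMMAS AND PROOFS =====
theorem pvUpperNotDigit (c : Char) (h : PySem.Chars.isupper c = true) :
    PySem.Chars.isdigit c = false := by
  cases hd : PySem.Chars.isdigit c
  · rfl
  · exfalso
    simp only [PySem.Chars.isupper, Bool.and_eq_true, decide_eq_true_eq] at h
    simp only [PySem.Chars.isdigit, Bool.and_eq_true, decide_eq_true_eq] at hd
    exact absurd (le_trans h.1 hd.2) (by decide)

theorem pvUpperAlnum (c : Char) (h : PySem.Chars.isupper c = true) :
    PySem.Chars.isalnum c = true := by
  simp [PySem.Chars.isalnum, PySem.Chars.isalpha, h]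

theorem pvDigitAlnum (c : Char) (h : PySem.Chars.isdigit c = true) :
    PySem.Chars.isalnum c = true := by
  simp [PySem.Chars.isalnum, h]

theorem pvCategory_eq_U (c : Char) :
    decide (pvCategory c = 'U') = PySem.Chars.isupper c := by
  unfold pvCategory
  split_ifs with h1 h2 h3
  · simp [h1]
  · simp only [Bool.not_eq_true] at h1; simp [h1]
  · simp only [Bool.not_eq_true] at h1; simp [h1]
  · simp only [Bool.not_eq_true] at h1; simp [h1]

theorem pvCategory_eq_D (c : Char) :
    decide (pvCategory c = 'D') = PySem.Chars.isdigit c := by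
  unfold pvCategory
  split_ifs with h1 h2 h3
  · simp [pvUpperNotDigit c h1]
  · simp [h2]
  · simp only [Bool.not_eq_true] at h2; simp [h2]
  · simp only [Bool.not_eq_true] at h2; simp [h2]

theorem pvCategory_eq_S (c : Char) :
    decide (pvCategory c = 'S') = !PySem.Chars.isalnum c := by
  unfold pvCategory
  split_ifs with h1 h2 h3
  · simp [pvUpperAlnum c h1]
  · simp [pvDigitAlnum c h2]
  · simp [h3]
  · simp only [Bool.not_eq_true] at h3; simp [h3]

theorem contains_cats (p : List Char) (k : Char) :
    PySem.Set.contains (PySem.Set.ofList (p.map pvCategory)) k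
      = p.any (fun c => decide (pvCategory c = k)) := by
  rw [Bool.eq_iff_iff]
  simp only [PySem.Set.contains_iff, PySem.Set.mem_ofList, List.mem_map,
    List.any_eq_true, decide_eq_true_eq]

theorem pvKey (p : List Char) :
    (let s2 := if p.any (fun c => PySem.Chars.isupper c) then p else p ++ ['A']
     let s3 := if s2.any (fun c => PySem.Chars.isdigit c) then s2 else s2 ++ ['3']
     if s3.any (fun c => !PySem.Chars.isalnum c) then s3 else s3 ++ ['!'])
    = p ++ (([('U', 'A'), ('D', '3'), ('S', '!')].filter
          (fun kf => !(PySem.Set.contains (PySem.Set.ofList (p.map pvCategory)) kf.1))).map (·.2)) := by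
  simp only [contains_cats, pvCategory_eq_U, pvCategory_eq_D, pvCategory_eq_S,
    List.filter_cons, List.filter_nil]
  cases hu : p.any (fun c => PySem.Chars.isupper c) <;>
    cases hd : p.any (fun c => PySem.Chars.isdigit c) <;>
      cases hsp : p.any (fun c => !PySem.Chars.isalnum c) <;>
        simp only [hu, hd, hsp, List.any_append, List.any_cons, List.any_nil,
          (by decide : PySem.Chars.isdigit 'A' = false),
          (by decide : PySem.Chars.isalnum 'A' = true),
          (by decide : PySem.Chars.isalnum '3' = true),
          Bool.not_true, Bool.not_false, Bool.or_false, Bool.false_or, Bool.or_true,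
          Bool.false_eq_true, eq_self_iff_true, if_true, if_false,
          List.map_cons, List.map_nil, List.append_assoc, List.append_nil, List.cons_append,
          List.nil_append]

theorem base_upgrade_py_spec : Claim_equal_base_upgrade_py := by
  intro pw _
  unfold Spec_base_upgrade_py base_upgrade_py base_upgrade_py_alt
  have hpad : (if 12 ≤ pw.toList.length then pw.toList
                else pw.toList ++ List.replicate (12 - pw.toList.length) '!')
            = (if pw.toList.length < 12 then pw.toList ++ List.replicate (12 - pw.toList.length) '!'
                else pw.toList) := by
    by_cases h : pw.toList.length < 12
    · rw [if_neg (by omega), if_pos h]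
    · rw [if_pos (by omega), if_neg h]
  rw [hpad]
  exact congrArg String.ofList (pvKey _)
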